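-- pv_equiv track=rewrite | github.com/Curio5813/CodeAbbey | problem156.py | analise_1_1
-- ===== SOURCE A (Python) =====
-- def analise_1_1(algol1):
--     """
--     First analise from swap-error.
--     :param algol1:
--     :return:
--     """
--     aux, analise1, cont, algols = [], [], 0, []
--     for i in range(0, len(algol1)):
--         for k in range(0, len(algol1[i])):
--             aux.append(algol1[i][k])
--             cont += 1
--             if cont > 0 and cont % 4 == 0:
--                 algols.append(aux)
--                 aux = []
--         analise1.append(algols)
--         algols = []
--     return analise1
-- ===== SOURCE B (Python) =====
-- def analise_1_1(algol1):
--     # All rows form one continuous stream: cut that stream into groups of four,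
--     # then list under each row the groups that are completed within it.
--     flat = [x for row in algol1 for x in row]
--     chunks = [flat[4 * k:4 * k + 4] for k in range(len(flat) // 4)]
--     result, seen, done = [], 0, 0
--     for row in algol1:
--         seen += len(row)
--         result.append(chunks[done:seen // 4])
--         done = seen // 4
--     return result
-- ===== Notes on version B (the rewrite author's own statement) =====
-- stated objective: alternative
-- what changed: A threads a buffer and a running counter through a nested row/element loop; B cuts the flattened stream into groups of four up front and then assigns each row the slice of groups completed within it, read off from prefix-sum // 4 boundaries.
import Mathlib
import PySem

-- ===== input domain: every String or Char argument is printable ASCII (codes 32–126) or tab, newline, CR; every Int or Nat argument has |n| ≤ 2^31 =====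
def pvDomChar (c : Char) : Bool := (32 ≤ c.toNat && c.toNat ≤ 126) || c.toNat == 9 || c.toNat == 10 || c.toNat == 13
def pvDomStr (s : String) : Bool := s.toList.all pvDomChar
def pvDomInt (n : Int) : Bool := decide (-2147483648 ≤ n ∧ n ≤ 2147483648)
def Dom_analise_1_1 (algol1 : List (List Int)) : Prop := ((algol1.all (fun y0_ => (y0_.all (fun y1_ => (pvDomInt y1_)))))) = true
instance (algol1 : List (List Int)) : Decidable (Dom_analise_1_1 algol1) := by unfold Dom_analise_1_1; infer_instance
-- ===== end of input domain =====

-- B cuts the flattened stream into groups of four up front and assigns each row the slice of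
-- groups completed within it via prefix-sum // 4 boundaries (objective: alternative decomposition).

-- ===== PORT A =====
-- inner loop body: state (aux, cont, algols)
def pvInner (s : List Int × Int × List (List Int)) (x : Int) : List Int × Int × List (List Int) :=
  let aux := s.1 ++ [x]
  let cont := s.2.1 + 1
  if cont > 0 ∧ PySem.Int.mod cont 4 = 0 then ([], cont, s.2.2 ++ [aux]) else (aux, cont, s.2.2)

-- outer loop body: state (aux, analise1, cont); algols is reset to [] at each row
def pvOuter (st : List Int × List (List (List Int)) × Int) (row : List Int) :
    List Int × List (List (List Int)) × Int :=
  let r := row.foldl pvInner (st.1, st.2.2, [])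
  (r.1, st.2.1 ++ [r.2.2], r.2.1)

def analise_1_1 (algol1 : List (List Int)) : List (List (List Int)) :=
  (algol1.foldl pvOuter ([], [], 0)).2.1

-- ===== PORT B =====
-- loop body of Source B: state (result, seen, done); chunks is the precomputed global chunk list
def pvStepB (chunks : List (List Int)) (s : List (List (List Int)) × Int × Int) (row : List Int) :
    List (List (List Int)) × Int × Int :=
  let seen := s.2.1 + (row.length : Int)
  (s.1 ++ [PySem.List.slice chunks (some s.2.2) (some (PySem.Int.floordiv seen 4))],
   seen, PySem.Int.floordiv seen 4)

def analise_1_1_alt (algol1 : List (List Int)) : List (List (List Int)) :=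
  let flat := algol1.flatMap (fun row => row)
  let chunks := (PySem.List.pyRange 0 (PySem.Int.floordiv (flat.length : Int) 4) 1).map
      (fun k => PySem.List.slice flat (some (4 * k)) (some (4 * k + 4)))
  (algol1.foldl (pvStepB chunks) ([], 0, 0)).1

-- ===== PRECONDITION & SPEC =====
def Spec_analise_1_1 (algol1 : List (List Int)) (out : List (List (List Int))) : Prop := out = analise_1_1_alt algol1
instance (algol1 : List (List Int)) (out : List (List (List Int))) : Decidable (Spec_analise_1_1 algol1 out) := by unfold Spec_analise_1_1; infer_instance

-- ===== CLAIM =====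
def Claim_equal_analise_1_1 : Prop := ∀ (algol1 : List (List Int)), Dom_analise_1_1 algol1 → Spec_analise_1_1 algol1 (analise_1_1 algol1)

-- ===== LEMMAS AND PROOFS =====

-- reference: process one row given a pending buffer; returns (chunks completed in this row, leftover)
def chunkRow : List Int → List Int → List (List Int) × List Int
  | p, [] => ([], p)
  | p, x :: xs =>
    let aux := p ++ [x]
    if aux.length = 4 then
      let r := chunkRow [] xs
      (aux :: r.1, r.2)
    else chunkRow aux xs

def goRows : List Int → List (List Int) → List (List (List Int))
  | _, [] => []
  | p, row :: rows => (chunkRow p row).1 :: goRows (chunkRow p row).2 rows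

-- complete groups of four of a list
def chunks4 : List Int → List (List Int)
  | a :: b :: c :: d :: rest => [a, b, c, d] :: chunks4 rest
  | _ => []

lemma chunkRow_len : ∀ (row p : List Int), p.length < 4 → (chunkRow p row).2.length < 4 := by
  intro row
  induction row with
  | nil => intro p hp; simpa [chunkRow] using hp
  | cons x xs ih =>
    intro p hp
    simp only [chunkRow]
    by_cases h : (p ++ [x]).length = 4
    · rw [if_pos h]; exact ih [] (by simp)
    · rw [if_neg h]; exact ih (p ++ [x]) (by simp at h ⊢; omega)

lemma chunkRow_len_mod : ∀ (row p : List Int), p.length < 4 →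
    (((chunkRow p row).2.length : Int)) = ((p.length : Int) + row.length) % 4 := by
  intro row
  induction row with
  | nil => intro p hp; simp [chunkRow]; omega
  | cons x xs ih =>
    intro p hp
    simp only [chunkRow]
    by_cases h : (p ++ [x]).length = 4
    · rw [if_pos h]
      have := ih [] (by simp)
      simp at h this ⊢
      omega
    · rw [if_neg h]
      have hlt : (p ++ [x]).length < 4 := by simp at h ⊢; omega
      have := ih (p ++ [x]) hlt
      simp at this ⊢
      omega

lemma innerFold : ∀ (row aux : List Int) (cont : Int) (algols : List (List Int)),
    aux.length < 4 → 0 ≤ cont → PySem.Int.mod cont 4 = (aux.length : Int) →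
    row.foldl pvInner (aux, cont, algols)
      = ((chunkRow aux row).2, cont + row.length, algols ++ (chunkRow aux row).1) := by
  intro row
  induction row with
  | nil => intro aux cont algols _ _ _; simp [chunkRow]
  | cons x xs ih =>
    intro aux cont algols hlen hc hm
    have hm' : PySem.Int.mod cont 4 = cont % 4 := PySem.Int.mod_eq_emod_of_pos (by norm_num)
    have hm1 : PySem.Int.mod (cont + 1) 4 = (cont + 1) % 4 := PySem.Int.mod_eq_emod_of_pos (by norm_num)
    rw [hm'] at hm
    rw [List.foldl_cons]
    show List.foldl pvInner (pvInner (aux, cont, algols) x) xs = _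
    simp only [pvInner]
    simp only [chunkRow]
    by_cases h : (aux ++ [x]).length = 4
    · have hfire : cont + 1 > 0 ∧ PySem.Int.mod (cont + 1) 4 = 0 := by
        refine ⟨by omega, ?_⟩
        rw [hm1]; simp at h; omega
      rw [if_pos hfire, if_pos h]
      rw [ih [] (cont + 1) (algols ++ [aux ++ [x]]) (by simp) (by omega)
          (by rw [hm1]; simp at h ⊢; omega)]
      simp
      omega
    · have hnof : ¬ (cont + 1 > 0 ∧ PySem.Int.mod (cont + 1) 4 = 0) := by
        rintro ⟨-, h2⟩
        rw [hm1] at h2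
        simp at h
        omega
      rw [if_neg hnof, if_neg h]
      rw [ih (aux ++ [x]) (cont + 1) algols (by simp at h ⊢; omega) (by omega)
          (by rw [hm1]; simp at h ⊢; omega)]
      simp
      omega

lemma outerFold : ∀ (rows : List (List Int)) (aux : List Int) (cont : Int)
    (acc : List (List (List Int))),
    aux.length < 4 → 0 ≤ cont → PySem.Int.mod cont 4 = (aux.length : Int) →
    (rows.foldl pvOuter (aux, acc, cont)).2.1
      = acc ++ goRows aux rows := by
  intro rows
  induction rows with
  | nil => intro aux cont acc _ _ _; simp [goRows]
  | cons row rows ih =>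
    intro aux cont acc hlen hc hm
    rw [List.foldl_cons]
    show (List.foldl pvOuter (pvOuter (aux, acc, cont) row) rows).2.1 = _
    simp only [pvOuter]
    rw [innerFold row aux cont [] hlen hc hm]
    simp only [List.nil_append]
    rw [ih (chunkRow aux row).2 (cont + row.length) (acc ++ [(chunkRow aux row).1])
        (chunkRow_len row aux hlen) (by omega) ?_]
    · simp [goRows]
    · rw [PySem.Int.mod_eq_emod_of_pos (by norm_num)]
      rw [PySem.Int.mod_eq_emod_of_pos (by norm_num)] at hm
      rw [chunkRow_len_mod row aux hlen]
      omega

lemma drop_four_cons (k : Nat) (a b c d : Int) (rest : List Int) :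
    List.drop (4 + k) (a :: b :: c :: d :: rest) = List.drop k rest := by
  rw [show 4 + k = k + 1 + 1 + 1 + 1 by omega]
  simp [List.drop_succ_cons]

lemma chunks4_short (l : List Int) (h : l.length < 4) : chunks4 l = [] := by
  match l, h with
  | [], _ => rfl
  | [a], _ => rfl
  | [a, b], _ => rfl
  | [a, b, c], _ => rfl

lemma len_lt_of_no_four (l : List Int)
    (h : ∀ (a b c d : Int) (rest : List Int), l = a :: b :: c :: d :: rest → False) :
    l.length < 4 := by
  rcases l with _ | ⟨a, l⟩
  · simp
  rcases l with _ | ⟨b, l⟩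
  · simp
  rcases l with _ | ⟨c, l⟩
  · simp
  rcases l with _ | ⟨d, l⟩
  · simp
  exact absurd rfl (h a b c d l)

lemma chunks4_append : ∀ (l m : List Int),
    chunks4 (l ++ m) = chunks4 l ++ chunks4 (l.drop (4 * (l.length / 4)) ++ m) := by
  intro l
  induction l using chunks4.induct with
  | case1 a b c d rest ih =>
    intro m
    have hlen : (a :: b :: c :: d :: rest).length / 4 = 1 + rest.length / 4 := by
      simp; omega
    rw [hlen, show 4 * (1 + rest.length / 4) = 4 + 4 * (rest.length / 4) by omega,
        drop_four_cons]
    simp only [List.cons_append, chunks4, ih m]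
  | case2 l h =>
    intro m
    have hl : l.length < 4 := len_lt_of_no_four l h
    have h0 : l.length / 4 = 0 := by omega
    rw [chunks4_short l hl, h0]
    simp

lemma chunks4_length : ∀ (l : List Int), (chunks4 l).length = l.length / 4 := by
  intro l
  induction l using chunks4.induct with
  | case1 a b c d rest ih => simp [chunks4, ih]; omega
  | case2 l h =>
    have hl : l.length < 4 := len_lt_of_no_four l h
    rw [chunks4_short l hl]
    simp; omega

lemma chunkRow_eq : ∀ (row p : List Int), p.length < 4 →
    chunkRow p row = (chunks4 (p ++ row), (p ++ row).drop (4 * ((p.length + row.length) / 4))) := by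
  intro row
  induction row with
  | nil =>
    intro p hp
    have h4 : 4 * (p.length / 4) = 0 := by omega
    simp [chunkRow, chunks4_short p hp, h4]
  | cons x xs ih =>
    intro p hp
    simp only [chunkRow]
    by_cases h : (p ++ [x]).length = 4
    · rw [if_pos h]
      have hp3 : p.length = 3 := by simp at h; omega
      obtain ⟨a, b, c, rfl⟩ : ∃ a b c, p = [a, b, c] := by
        match p, hp3 with
        | [a, b, c], _ => exact ⟨a, b, c, rfl⟩
      rw [ih [] (by simp)]
      have harith : ([a, b, c].length + (x :: xs).length) / 4 = 1 + xs.length / 4 := by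
        simp; omega
      rw [harith, show 4 * (1 + xs.length / 4) = 4 + 4 * (xs.length / 4) by omega]
      have hd : [a, b, c] ++ x :: xs = a :: b :: c :: x :: xs := by simp
      rw [hd, drop_four_cons]
      simp [chunks4]
    · rw [if_neg h]
      have hlt : (p ++ [x]).length < 4 := by simp at h ⊢; omega
      rw [ih (p ++ [x]) hlt]
      have h1 : (p ++ [x]) ++ xs = p ++ x :: xs := by simp
      have h2 : (p ++ [x]).length + xs.length = p.length + (x :: xs).length := by simp; omega
      rw [h1, h2]

-- the list comprehension of Source B computes exactly the groups of four
lemma chunksList_eq : ∀ (flat : List Int),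
    (PySem.List.pyRange 0 (PySem.Int.floordiv (flat.length : Int) 4) 1).map
      (fun k => PySem.List.slice flat (some (4 * k)) (some (4 * k + 4))) = chunks4 flat := by
  intro flat
  induction flat using chunks4.induct with
  | case1 a b c d rest ih =>
    have hlen : ((a :: b :: c :: d :: rest).length : Int) = (rest.length : Int) + 4 := by
      simp; omega
    rw [hlen]
    have hfd : PySem.Int.floordiv ((rest.length : Int) + 4) 4
        = PySem.Int.floordiv (rest.length : Int) 4 + 1 := by
      rw [PySem.Int.floordiv_eq_ediv_of_pos (by norm_num),
          PySem.Int.floordiv_eq_ediv_of_pos (by norm_num)]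
      omega
    rw [hfd]
    have hnn : (0 : Int) ≤ PySem.Int.floordiv (rest.length : Int) 4 := by
      rw [PySem.Int.floordiv_eq_ediv_of_pos (by norm_num)]
      positivity
    have htail : List.map (fun k => PySem.List.slice (a :: b :: c :: d :: rest)
          (some (4 * k)) (some (4 * k + 4)))
        (PySem.List.pyRange (0 + 1) (PySem.Int.floordiv (rest.length : Int) 4 + 1) 1)
        = chunks4 rest := by
      rw [← ih, show (0 : Int) + 1 = 1 by norm_num]
      rw [PySem.List.pyRange_one 1, PySem.List.pyRange_one 0]
      rw [show (PySem.Int.floordiv (rest.length : Int) 4 + 1 - 1).toNat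
            = (PySem.Int.floordiv (rest.length : Int) 4 - 0).toNat by omega]
      rw [List.map_map, List.map_map]
      apply List.map_congr_left
      intro k _
      simp only [Function.comp_apply]
      rw [PySem.List.slice_toNat, PySem.List.slice_toNat]
      have h1 : (4 * (1 + (k : Int))).toNat = 4 + (4 * ((0 : Int) + (k : Int))).toNat := by omega
      have h2 : (4 * (1 + (k : Int)) + 4).toNat - (4 + (4 * ((0 : Int) + (k : Int))).toNat) = 4 := by
        omega
      have h3 : (4 * ((0 : Int) + (k : Int)) + 4).toNat - (4 * ((0 : Int) + (k : Int))).toNat = 4 := by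
        omega
      rw [h1, h2, h3, drop_four_cons]
      all_goals positivity
    rw [PySem.List.pyRange_one_cons (by omega), List.map_cons]
    simp only [chunks4]
    rw [htail]
    congr 1
  | case2 l h =>
    have hl : l.length < 4 := len_lt_of_no_four l h
    have h0 : PySem.Int.floordiv (l.length : Int) 4 = 0 := by
      rw [PySem.Int.floordiv_eq_ediv_of_pos (by norm_num)]
      omega
    rw [h0, chunks4_short l hl, PySem.List.pyRange_one_eq_nil (by norm_num)]
    simp

lemma Bfold : ∀ (rows : List (List Int)) (pref : List Int) (acc : List (List (List Int)))
    (C : List (List Int)), C = chunks4 (pref ++ rows.flatten) →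
    (rows.foldl (pvStepB C) (acc, (pref.length : Int), ((pref.length / 4 : Nat) : Int))).1
      = acc ++ goRows (pref.drop (4 * (pref.length / 4))) rows := by
  intro rows
  induction rows with
  | nil => intro pref acc C _; simp [goRows]
  | cons row rest ih =>
    intro pref acc C hC
    set carry := pref.drop (4 * (pref.length / 4)) with hcarry
    have hclen : carry.length = pref.length - 4 * (pref.length / 4) := by
      rw [hcarry]; simp
    have hcarrylt : carry.length < 4 := by omega
    rw [List.foldl_cons]
    show (List.foldl (pvStepB C) (pvStepB C (acc, _, _) row) rest).1 = _
    simp only [pvStepB]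
    have hseen : (pref.length : Int) + (row.length : Int)
        = (((pref.length + row.length : Nat)) : Int) := by push_cast; ring
    have hfd : PySem.Int.floordiv (((pref.length + row.length : Nat)) : Int) 4
        = (((pref.length + row.length) / 4 : Nat) : Int) := PySem.Int.floordiv_natCast _ 4
    rw [hseen, hfd]
    -- the slice taken this round is exactly (chunkRow carry row).1
    have hsl : PySem.List.slice C (some ((pref.length / 4 : Nat) : Int))
        (some (((pref.length + row.length) / 4 : Nat) : Int)) = (chunkRow carry row).1 := by
      rw [PySem.List.slice_natCast, hC]
      have hsplit1 : pref ++ (row :: rest).flatten = pref ++ (row ++ rest.flatten) := by simp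
      rw [hsplit1, chunks4_append pref (row ++ rest.flatten), ← hcarry]
      have hdl : (chunks4 pref).length = pref.length / 4 := chunks4_length pref
      rw [List.drop_append]
      have e1 : List.drop (pref.length / 4) (chunks4 pref) = [] := by
        rw [← hdl]; exact List.drop_length
      have e2 : pref.length / 4 - (chunks4 pref).length = 0 := by omega
      rw [e1, e2, List.drop_zero, List.nil_append]
      rw [show carry ++ (row ++ rest.flatten) = (carry ++ row) ++ rest.flatten by simp,
          chunks4_append (carry ++ row) rest.flatten]
      have hN : (chunks4 (carry ++ row)).length
          = (pref.length + row.length) / 4 - pref.length / 4 := by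
        rw [chunks4_length]
        simp only [List.length_append]
        omega
      rw [List.take_left' hN, chunkRow_eq row carry hcarrylt]
    rw [hsl]
    have hC' : C = chunks4 ((pref ++ row) ++ rest.flatten) := by
      rw [hC]; simp
    have hih := ih (pref ++ row) (acc ++ [(chunkRow carry row).1]) C hC'
    simp only [List.length_append] at hih
    rw [hih]
    have hleft : (pref ++ row).drop (4 * ((pref.length + row.length) / 4))
        = (chunkRow carry row).2 := by
      rw [chunkRow_eq row carry hcarrylt]
      have hsplitp : pref ++ row = pref.take (4 * (pref.length / 4)) ++ (carry ++ row) := by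
        rw [hcarry, ← List.append_assoc, List.take_append_drop]
      have hA : (pref.take (4 * (pref.length / 4))).length = 4 * (pref.length / 4) := by
        simp; omega
      rw [hsplitp, show 4 * ((pref.length + row.length) / 4)
            = (pref.take (4 * (pref.length / 4))).length + 4 * ((carry.length + row.length) / 4) by
          rw [hA]; omega]
      rw [List.drop_length_add_append]
    rw [hleft]
    simp [goRows]

-- ===== VERDICT =====
theorem analise_1_1_spec : Claim_equal_analise_1_1 := by
  unfold Claim_equal_analise_1_1
  intro algol1 _
  unfold Spec_analise_1_1 analise_1_1 analise_1_1_alt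
  rw [outerFold algol1 [] 0 [] (by simp) (by norm_num) (by decide)]
  show ([] : List (List (List Int))) ++ goRows [] algol1
      = (algol1.foldl (pvStepB ((PySem.List.pyRange 0
            (PySem.Int.floordiv (((algol1.flatMap (fun row => row)).length : Int)) 4) 1).map
          (fun k => PySem.List.slice (algol1.flatMap (fun row => row))
            (some (4 * k)) (some (4 * k + 4))))) ([], 0, 0)).1
  rw [chunksList_eq]
  have hC : chunks4 (algol1.flatMap (fun row => row)) = chunks4 ([] ++ algol1.flatten) := by
    simp [List.flatMap_id']
  have hB := Bfold algol1 [] [] (chunks4 (algol1.flatMap (fun row => row))) hC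
  simp only [List.length_nil, Nat.zero_div, Nat.cast_zero, Nat.mul_zero, List.drop_nil,
    List.nil_append] at hB
  rw [hB]
  simp
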